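-- pv_equiv track=rewrite | github.com/invertome/berghia-chemogpcrs | scripts/analyze_ecl.py | parse_topology_string
-- ===== SOURCE A (Python) =====
-- from typing import Dict, List, Tuple, Optional
--
-- def parse_topology_string(topology: str) -> Dict:
--     """
--     Parse DeepTMHMM topology string.
--
--     Format: string of i/o/M characters
--     - i: inside (cytoplasmic)
--     - o: outside (extracellular)
--     - M: membrane (transmembrane)
--
--     Returns dict with tm_regions, ecl_regions, icl_regions.
--     Coordinates are 1-indexed, inclusive (matching DeepTMHMM convention).
--     """
--     regions = {
--         'tm_regions': [],
--         'ecl_regions': [],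
--         'icl_regions': []
--     }
--
--     current_type = None
--     start = 0
--
--     for i, char in enumerate(topology):
--         if char.upper() == 'M':
--             region_type = 'tm'
--         elif char.upper() == 'O':
--             region_type = 'ecl'
--         elif char.upper() == 'I':
--             region_type = 'icl'
--         else:
--             continue
--
--         if region_type != current_type:
--             if current_type is not None:
--                 regions[f'{current_type}_regions'].append((start + 1, i))
--             current_type = region_type
--             start = i
--
--     # Add final region
--     if current_type is not None:
--         regions[f'{current_type}_regions'].append((start + 1, len(topology)))
--
--     return regions
-- ===== SOURCE B (Python) =====
-- from itertools import groupby
--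
-- def parse_topology_string(topology: str):
--     """Forward-fill each position's region type, then group maximal runs."""
--     kind = {'M': 'tm', 'O': 'ecl', 'I': 'icl'}
--     types = []
--     prev = None
--     for ch in topology:
--         prev = kind.get(ch.upper(), prev)
--         types.append(prev)
--     tm, ecl, icl = [], [], []
--     idx = 0
--     for t, grp in groupby(types):
--         n = len(list(grp))
--         run = (idx + 1, idx + n)
--         if t == 'tm':
--             tm.append(run)
--         elif t == 'ecl':
--             ecl.append(run)
--         elif t == 'icl':
--             icl.append(run)
--         idx += n
--     return {'tm_regions': tm, 'ecl_regions': ecl, 'icl_regions': icl}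
-- ===== Notes on version B (the rewrite author's own statement) =====
-- stated objective: idiomatic
-- what changed: Instead of a single stateful scan tracking the current region and start index, B forward-fills each position's region type (unrecognised characters inherit the previous type) and then groups maximal same-type runs with itertools.groupby, emitting one interval per run.
import Mathlib
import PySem

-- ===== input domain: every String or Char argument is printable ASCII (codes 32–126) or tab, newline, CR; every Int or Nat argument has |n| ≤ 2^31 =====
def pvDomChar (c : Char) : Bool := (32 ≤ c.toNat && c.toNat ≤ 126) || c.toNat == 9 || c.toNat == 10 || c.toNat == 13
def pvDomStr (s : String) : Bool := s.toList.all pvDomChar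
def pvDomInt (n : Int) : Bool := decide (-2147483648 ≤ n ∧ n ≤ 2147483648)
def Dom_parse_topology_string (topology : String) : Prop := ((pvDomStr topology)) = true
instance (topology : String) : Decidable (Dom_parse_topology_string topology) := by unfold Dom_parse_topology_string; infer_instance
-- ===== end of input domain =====

-- B replaces A's single stateful scan (current region type + start index) by forward-filling a
-- per-position type list and grouping maximal same-type runs (idiomatic decomposition, same cost).

-- ===== PORT A =====
-- A's for-loop as structural recursion over the characters, carrying (regions, current_type, start)
def pvLoopA : List Char → Nat →
    (PySem.Dict String (List (Int × Int)) × Option String × Nat) →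
    (PySem.Dict String (List (Int × Int)) × Option String × Nat)
  | [], _, st => st
  | ch :: rest, i, (regions, current_type, start) =>
    match (if ch.toUpper = 'M' then some "tm"
           else if ch.toUpper = 'O' then some "ecl"
           else if ch.toUpper = 'I' then some "icl"
           else none : Option String) with
    | none => pvLoopA rest (i + 1) (regions, current_type, start)
    | some region_type =>
      if some region_type ≠ current_type then
        let regions' :=
          match current_type with
          | none => regions
          | some ct => regions.modify (ct ++ "_regions") []
              (fun l => l ++ [((start : Int) + 1, (i : Int))])
        pvLoopA rest (i + 1) (regions', some region_type, i)
      else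
        pvLoopA rest (i + 1) (regions, current_type, start)

def parse_topology_string (topology : String) : List (String × List (Int × Int)) :=
  let regions0 : PySem.Dict String (List (Int × Int)) :=
    PySem.Dict.ofList [("tm_regions", []), ("ecl_regions", []), ("icl_regions", [])]
  match pvLoopA topology.toList 0 (regions0, none, 0) with
  | (regions, current_type, start) =>
    match current_type with
    | none => regions.items
    | some ct => (regions.modify (ct ++ "_regions") []
        (fun l => l ++ [((start : Int) + 1, (topology.toList.length : Int))])).items

-- ===== PORT B =====
def pvKindDict : PySem.Dict Char String :=
  PySem.Dict.ofList [('M', "tm"), ('O', "ecl"), ('I', "icl")]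

-- per-position types with forward fill: prev = kind.get(ch.upper(), prev)
def pvFill : Option String → List Char → List (Option String)
  | _, [] => []
  | prev, ch :: rest =>
    let t : Option String :=
      match PySem.Dict.get? pvKindDict ch.toUpper with
      | some v => some v
      | none => prev
    t :: pvFill t rest

-- itertools.groupby over the type list: consume one maximal run per step
def pvGroups : List (Option String) → Nat →
    (List (Int × Int) × List (Int × Int) × List (Int × Int)) →
    (List (Int × Int) × List (Int × Int) × List (Int × Int))
  | [], _, acc => acc
  | t :: rest, idx, (tm, ecl, icl) =>
    let n : Nat := 1 + (rest.takeWhile (fun x => x == t)).length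
    let run : Int × Int := ((idx : Int) + 1, (idx : Int) + (n : Int))
    let acc' :=
      if t == some "tm" then (tm ++ [run], ecl, icl)
      else if t == some "ecl" then (tm, ecl ++ [run], icl)
      else if t == some "icl" then (tm, ecl, icl ++ [run])
      else (tm, ecl, icl)
    pvGroups (rest.dropWhile (fun x => x == t)) (idx + n) acc'
  termination_by l => l.length
  decreasing_by
    simp only [List.length_cons]
    exact Nat.lt_succ_of_le (List.length_dropWhile_le _ _)

def parse_topology_string_alt (topology : String) : List (String × List (Int × Int)) :=
  let types := pvFill none topology.toList
  match pvGroups types 0 ([], [], []) with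
  | (tm, ecl, icl) => [("tm_regions", tm), ("ecl_regions", ecl), ("icl_regions", icl)]

-- ===== PRECONDITION & SPEC =====
def Spec_parse_topology_string (topology : String) (out : List (String × List (Int × Int))) : Prop := out = parse_topology_string_alt topology
instance (topology : String) (out : List (String × List (Int × Int))) : Decidable (Spec_parse_topology_string topology out) := by unfold Spec_parse_topology_string; infer_instance

-- ===== CLAIM (what is proved, stated in full; the proofs are below) =====
def Claim_equal_parse_topology_string : Prop := ∀ (topology : String), Dom_parse_topology_string topology → Spec_parse_topology_string topology (parse_topology_string topology)

-- ===== LEMMAS AND PROOFS =====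

-- A's if/elif chain as a function (definitionally the chain inlined in pvLoopA)
def pvKind (ch : Char) : Option String :=
  if ch.toUpper = 'M' then some "tm"
  else if ch.toUpper = 'O' then some "ecl"
  else if ch.toUpper = 'I' then some "icl"
  else none

theorem pvKindGet (c : Char) : PySem.Dict.get? pvKindDict c.toUpper = pvKind c := by
  have h : pvKindDict = PySem.Dict.mk [('M', "tm"), ('O', "ecl"), ('I', "icl")] := by decide
  rw [h]
  simp only [PySem.Dict.get?_mk_cons, pvKind]
  by_cases hM : c.toUpper = 'M' <;> by_cases hO : c.toUpper = 'O' <;>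
    by_cases hI : c.toUpper = 'I' <;> simp_all [PySem.Dict.get?] <;>
    rw [if_neg (mt Eq.symm hM), if_neg (mt Eq.symm hO), if_neg (mt Eq.symm hI)]

-- mediating emitter: the ordered list of (type, lo, hi) regions both programs produce
def pvM : List Char → Nat → Option (String × Nat) → List (String × Int × Int)
  | [], i, cur =>
    match cur with
    | none => []
    | some (t, s) => [(t, (s : Int) + 1, (i : Int))]
  | ch :: rest, i, cur =>
    match pvKind ch with
    | none => pvM rest (i + 1) cur
    | some rt =>
      match cur with
      | none => pvM rest (i + 1) (some (rt, i))
      | some (t, s) =>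
        if rt = t then pvM rest (i + 1) cur
        else (t, (s : Int) + 1, (i : Int)) :: pvM rest (i + 1) (some (rt, i))

def pvStepD (d : PySem.Dict String (List (Int × Int))) (r : String × Int × Int) :
    PySem.Dict String (List (Int × Int)) :=
  d.modify (r.1 ++ "_regions") [] (fun l => l ++ [r.2])

def pvApplyD (d : PySem.Dict String (List (Int × Int))) (rs : List (String × Int × Int)) :
    PySem.Dict String (List (Int × Int)) :=
  rs.foldl pvStepD d

def pvStepT (acc : List (Int × Int) × List (Int × Int) × List (Int × Int))
    (r : String × Int × Int) : List (Int × Int) × List (Int × Int) × List (Int × Int) :=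
  match acc with
  | (tm, ecl, icl) =>
    if r.1 = "tm" then (tm ++ [r.2], ecl, icl)
    else if r.1 = "ecl" then (tm, ecl ++ [r.2], icl)
    else if r.1 = "icl" then (tm, ecl, icl ++ [r.2])
    else (tm, ecl, icl)

def pvApplyT (acc : List (Int × Int) × List (Int × Int) × List (Int × Int))
    (rs : List (String × Int × Int)) : List (Int × Int) × List (Int × Int) × List (Int × Int) :=
  rs.foldl pvStepT acc

def pvPack : Option String → Nat → Option (String × Nat)
  | none, _ => none
  | some t, s => some (t, s)

theorem pvAM (cs : List Char) (i : Nat) (cur : Option String) (s : Nat)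
    (d : PySem.Dict String (List (Int × Int))) :
    (match pvLoopA cs i (d, cur, s) with
     | (regions, current_type, start) =>
       match current_type with
       | none => regions
       | some ct => regions.modify (ct ++ "_regions") []
           (fun l => l ++ [((start : Int) + 1, ((i + cs.length : Nat) : Int))]))
    = pvApplyD d (pvM cs i (pvPack cur s)) := by
  induction cs generalizing i cur s d with
  | nil =>
    cases cur <;> simp [pvLoopA, pvM, pvPack, pvApplyD, pvStepD]
  | cons ch rest ih =>
    have hlen : ∀ j : Nat, j + (ch :: rest).length = (j + 1) + rest.length := by
      intro j; simp [List.length_cons]; omega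
    rw [hlen]
    show (match pvLoopA (ch :: rest) i (d, cur, s) with
     | (regions, current_type, start) =>
       match current_type with
       | none => regions
       | some ct => regions.modify (ct ++ "_regions") []
           (fun l => l ++ [((start : Int) + 1, (((i+1) + rest.length : Nat) : Int))]))
      = pvApplyD d (pvM (ch :: rest) i (pvPack cur s))
    rw [show pvLoopA (ch :: rest) i (d, cur, s) =
      (match pvKind ch with
       | none => pvLoopA rest (i + 1) (d, cur, s)
       | some region_type =>
         if some region_type ≠ cur then
           pvLoopA rest (i + 1)
             ((match cur with
               | none => d
               | some ct => d.modify (ct ++ "_regions") []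
                   (fun l => l ++ [((s : Int) + 1, (i : Int))])), some region_type, i)
         else pvLoopA rest (i + 1) (d, cur, s)) from rfl]
    rw [show pvM (ch :: rest) i (pvPack cur s) =
      (match pvKind ch with
       | none => pvM rest (i + 1) (pvPack cur s)
       | some rt =>
         match pvPack cur s with
         | none => pvM rest (i + 1) (some (rt, i))
         | some (t, s') =>
           if rt = t then pvM rest (i + 1) (pvPack cur s)
           else (t, (s' : Int) + 1, (i : Int)) :: pvM rest (i + 1) (some (rt, i))) from rfl]
    cases h : pvKind ch with
    | none => exact ih (i+1) cur s d
    | some rt =>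
      cases cur with
      | none =>
        simp only [pvPack]
        rw [if_pos (by simp)]
        exact ih (i+1) (some rt) i d
      | some ct =>
        simp only [pvPack]
        by_cases hrt : rt = ct
        · rw [if_neg (by simp [hrt]), if_pos hrt]
          exact ih (i+1) (some ct) s d
        · rw [if_pos (by simp [hrt]), if_neg hrt]
          have := ih (i+1) (some rt) i
            (d.modify (ct ++ "_regions") [] (fun l => l ++ [((s : Int) + 1, (i : Int))]))
          simp only [pvApplyD, List.foldl_cons] at *
          exact this


theorem pvTW (k : Nat) (a : Option String) (l : List (Option String)) :
    (List.replicate k a ++ l).takeWhile (fun x => x == a)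
      = List.replicate k a ++ l.takeWhile (fun x => x == a) := by
  induction k with
  | zero => simp
  | succ k ih => simp [List.replicate_succ, ih]

theorem pvDW (k : Nat) (a : Option String) (l : List (Option String)) :
    (List.replicate k a ++ l).dropWhile (fun x => x == a) = l.dropWhile (fun x => x == a) := by
  induction k with
  | zero => simp
  | succ k ih => simp [List.replicate_succ, ih]

theorem pvRepMerge (k : Nat) (a : Option String) (l : List (Option String)) :
    List.replicate k a ++ a :: l = List.replicate (k + 1) a ++ l := by
  simp [List.replicate_succ', List.append_assoc]

theorem pvDispatch (t : String) (tm ecl icl : List (Int × Int)) (run : Int × Int) :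
    (if (some t == some "tm") then (tm ++ [run], ecl, icl)
     else if (some t == some "ecl") then (tm, ecl ++ [run], icl)
     else if (some t == some "icl") then (tm, ecl, icl ++ [run])
     else (tm, ecl, icl)) = pvStepT (tm, ecl, icl) (t, run) := by
  simp [pvStepT]

theorem pvBMsome (cs : List Char) (t : String) (k s : Nat)
    (acc : List (Int × Int) × List (Int × Int) × List (Int × Int)) :
    pvGroups (List.replicate (k + 1) (some t) ++ pvFill (some t) cs) s acc
      = pvApplyT acc (pvM cs (s + (k + 1)) (some (t, s))) := by
  induction cs generalizing t k s acc with
  | nil =>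
    obtain ⟨tm, ecl, icl⟩ := acc
    simp only [pvFill, List.append_nil, List.replicate_succ, pvM]
    rw [pvGroups]
    simp only [List.takeWhile_replicate, List.dropWhile_replicate, beq_self_eq_true, if_true,
      List.length_replicate]
    rw [pvGroups]
    rw [pvDispatch]
    simp only [pvApplyT, List.foldl_cons, List.foldl_nil]
    congr 1
    push_cast
    rw [Int.add_comm 1 (k : Int)]
  | cons ch rest ih =>
    obtain ⟨tm, ecl, icl⟩ := acc
    rw [show pvFill (some t) (ch :: rest) =
      (match pvKind ch with
       | some v => some v
       | none => some t) :: pvFill (match pvKind ch with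
       | some v => some v
       | none => some t) rest from by
        simp only [pvFill]; rw [pvKindGet]]
    cases h : pvKind ch with
    | none =>
      simp only
      rw [pvRepMerge, ih]
      rw [show pvM (ch :: rest) (s + (k + 1)) (some (t, s))
            = pvM rest (s + (k + 1) + 1) (some (t, s)) from by
        rw [pvM]; rw [h]]
      rw [show s + (k + 1) + 1 = s + (k + 1 + 1) from by omega]
    | some u =>
      by_cases hut : u = t
      · subst hut
        simp only
        rw [pvRepMerge, ih]
        rw [show pvM (ch :: rest) (s + (k + 1)) (some (u, s))
              = pvM rest (s + (k + 1) + 1) (some (u, s)) from by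
          rw [pvM]; rw [h]; simp]
        rw [show s + (k + 1) + 1 = s + (k + 1 + 1) from by omega]
      · simp only
        rw [List.replicate_succ, List.cons_append]
        rw [pvGroups]
        simp only [pvTW, List.takeWhile_cons]
        rw [show ((some u == some t) : Bool) = false from by simp [hut]]
        simp only [Bool.false_eq_true, if_false, List.append_nil, List.length_replicate,
          pvDW, List.dropWhile_cons]
        rw [show ((some u == some t) : Bool) = false from by simp [hut]]
        simp only [Bool.false_eq_true, if_false]
        rw [show (some u :: pvFill (some u) rest)
              = List.replicate (0 + 1) (some u) ++ pvFill (some u) rest from by simp]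
        rw [ih]
        rw [show pvM (ch :: rest) (s + (k + 1)) (some (t, s))
              = (t, (s : Int) + 1, ((s + (k + 1) : Nat) : Int))
                :: pvM rest (s + (k + 1) + 1) (some (u, s + (k + 1))) from by
          rw [pvM]; rw [h]; simp [hut]]
        simp only [pvApplyT, List.foldl_cons]
        rw [pvDispatch]
        rw [show s + (1 + k) = s + (k + 1) from by omega]
        congr 2
        push_cast
        rw [Int.add_comm 1 (k : Int)]

theorem pvBMnone (cs : List Char) (k s : Nat)
    (acc : List (Int × Int) × List (Int × Int) × List (Int × Int)) :
    pvGroups (List.replicate k (none : Option String) ++ pvFill none cs) s acc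
      = pvApplyT acc (pvM cs (s + k) none) := by
  induction cs generalizing k s acc with
  | nil =>
    obtain ⟨tm, ecl, icl⟩ := acc
    simp only [pvFill, List.append_nil, pvM, pvApplyT, List.foldl_nil]
    cases k with
    | zero => rw [List.replicate_zero, pvGroups]
    | succ k =>
      rw [List.replicate_succ, pvGroups]
      simp only [List.takeWhile_replicate, List.dropWhile_replicate, beq_self_eq_true, if_true]
      rw [show ((none == some "tm") : Bool) = false from rfl,
          show ((none == some "ecl") : Bool) = false from rfl,
          show ((none == some "icl") : Bool) = false from rfl]
      simp only [Bool.false_eq_true, if_false]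
      rw [pvGroups]
  | cons ch rest ih =>
    obtain ⟨tm, ecl, icl⟩ := acc
    rw [show pvFill none (ch :: rest) =
      (match pvKind ch with
       | some v => some v
       | none => none) :: pvFill (match pvKind ch with
       | some v => some v
       | none => none) rest from by
        simp only [pvFill]; rw [pvKindGet]]
    cases h : pvKind ch with
    | none =>
      simp only
      rw [pvRepMerge, ih]
      rw [show pvM (ch :: rest) (s + k) none = pvM rest (s + k + 1) none from by
        rw [pvM]; rw [h]]
      rw [show s + k + 1 = s + (k + 1) from by omega]
    | some u =>
      simp only
      rw [show pvM (ch :: rest) (s + k) none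
            = pvM rest (s + k + 1) (some (u, s + k)) from by rw [pvM]; rw [h]]
      cases k with
      | zero =>
        rw [List.replicate_zero, List.nil_append]
        rw [show (some u :: pvFill (some u) rest)
              = List.replicate (0 + 1) (some u) ++ pvFill (some u) rest from by simp]
        rw [pvBMsome]
        simp
      | succ k =>
        rw [List.replicate_succ, List.cons_append, pvGroups]
        simp only [pvTW, List.takeWhile_cons]
        rw [show ((some u == (none : Option String)) : Bool) = false from rfl]
        simp only [Bool.false_eq_true, if_false, List.append_nil, List.length_replicate,
          pvDW, List.dropWhile_cons]
        rw [show ((some u == (none : Option String)) : Bool) = false from rfl]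
        simp only [Bool.false_eq_true, if_false]
        rw [show ((none == some "tm") : Bool) = false from rfl,
            show ((none == some "ecl") : Bool) = false from rfl,
            show ((none == some "icl") : Bool) = false from rfl]
        simp only [Bool.false_eq_true, if_false]
        rw [show (some u :: pvFill (some u) rest)
              = List.replicate (0 + 1) (some u) ++ pvFill (some u) rest from by simp]
        rw [pvBMsome]
        rw [show s + (1 + k) = s + (k + 1) from by omega]


theorem pvMinv (cs : List Char) (i : Nat) (cur : Option (String × Nat))
    (hc : ∀ t s, cur = some (t, s) → t = "tm" ∨ t = "ecl" ∨ t = "icl") :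
    ∀ r ∈ pvM cs i cur, r.1 = "tm" ∨ r.1 = "ecl" ∨ r.1 = "icl" := by
  induction cs generalizing i cur with
  | nil =>
    intro r hr
    cases cur with
    | none => simp [pvM] at hr
    | some p =>
      obtain ⟨t, s⟩ := p
      simp [pvM] at hr
      subst hr
      exact hc t s rfl
  | cons ch rest ih =>
    intro r hr
    rw [pvM] at hr
    have hk : ∀ u, pvKind ch = some u → (u = "tm" ∨ u = "ecl" ∨ u = "icl") := by
      intro u hu
      unfold pvKind at hu
      split_ifs at hu <;> simp_all
    cases h : pvKind ch with
    | none =>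
      rw [h] at hr
      exact ih (i + 1) cur hc r hr
    | some u =>
      rw [h] at hr
      cases cur with
      | none =>
        exact ih (i + 1) (some (u, i)) (by intro t s he; cases he; exact hk u h) r hr
      | some p =>
        obtain ⟨t, s⟩ := p
        dsimp only at hr
        by_cases hut : u = t
        · rw [if_pos hut] at hr
          exact ih (i + 1) (some (t, s)) hc r hr
        · rw [if_neg hut] at hr
          rcases List.mem_cons.mp hr with h1 | h2
          · subst h1; exact hc t s rfl
          · exact ih (i + 1) (some (u, i)) (by intro t' s' he; cases he; exact hk u h) r h2

theorem pvDT (rs : List (String × Int × Int))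
    (h : ∀ r ∈ rs, r.1 = "tm" ∨ r.1 = "ecl" ∨ r.1 = "icl") :
    ∀ a b c : List (Int × Int),
    (pvApplyD (PySem.Dict.mk [("tm_regions", a), ("ecl_regions", b), ("icl_regions", c)]) rs).items
      = (match pvApplyT (a, b, c) rs with
         | (tm, ecl, icl) => [("tm_regions", tm), ("ecl_regions", ecl), ("icl_regions", icl)]) := by
  induction rs with
  | nil => intro a b c; rfl
  | cons r rs ih =>
    intro a b c
    obtain ⟨t, pr⟩ := r
    simp only [pvApplyD, pvApplyT, List.foldl_cons] at *
    rcases h (t, pr) List.mem_cons_self with h1 | h1 | h1 <;> subst h1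
    · rw [show pvStepD (PySem.Dict.mk [("tm_regions", a), ("ecl_regions", b), ("icl_regions", c)])
            ("tm", pr)
          = PySem.Dict.mk [("tm_regions", a ++ [pr]), ("ecl_regions", b), ("icl_regions", c)] from by
        simp [pvStepD, PySem.Dict.modify, PySem.Dict.insert, PySem.Dict.getD,
          PySem.Dict.get?, PySem.Dict.contains]]
      rw [show pvStepT (a, b, c) ("tm", pr) = (a ++ [pr], b, c) from by simp [pvStepT]]
      exact ih (fun r hr => h r (List.mem_cons_of_mem _ hr)) (a ++ [pr]) b c
    · rw [show pvStepD (PySem.Dict.mk [("tm_regions", a), ("ecl_regions", b), ("icl_regions", c)])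
            ("ecl", pr)
          = PySem.Dict.mk [("tm_regions", a), ("ecl_regions", b ++ [pr]), ("icl_regions", c)] from by
        simp [pvStepD, PySem.Dict.modify, PySem.Dict.insert, PySem.Dict.getD,
          PySem.Dict.get?, PySem.Dict.contains]]
      rw [show pvStepT (a, b, c) ("ecl", pr) = (a, b ++ [pr], c) from by simp [pvStepT]]
      exact ih (fun r hr => h r (List.mem_cons_of_mem _ hr)) a (b ++ [pr]) c
    · rw [show pvStepD (PySem.Dict.mk [("tm_regions", a), ("ecl_regions", b), ("icl_regions", c)])
            ("icl", pr)
          = PySem.Dict.mk [("tm_regions", a), ("ecl_regions", b), ("icl_regions", c ++ [pr])] from by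
        simp [pvStepD, PySem.Dict.modify, PySem.Dict.insert, PySem.Dict.getD,
          PySem.Dict.get?, PySem.Dict.contains]]
      rw [show pvStepT (a, b, c) ("icl", pr) = (a, b, c ++ [pr]) from by simp [pvStepT]]
      exact ih (fun r hr => h r (List.mem_cons_of_mem _ hr)) a b (c ++ [pr])


theorem pvItemsPull (p : PySem.Dict String (List (Int × Int)) × Option String × Nat) (len : Nat) :
    (match p with
     | (regions, current_type, start) =>
       match current_type with
       | none => regions.items
       | some ct => (regions.modify (ct ++ "_regions") []
           (fun l => l ++ [((start : Int) + 1, (len : Int))])).items)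
    = (match p with
       | (regions, current_type, start) =>
         match current_type with
         | none => regions
         | some ct => regions.modify (ct ++ "_regions") []
             (fun l => l ++ [((start : Int) + 1, (len : Int))])).items := by
  rcases p with ⟨r, c, s⟩
  cases c <;> rfl

theorem pv_main (topology : String) :
    parse_topology_string topology = parse_topology_string_alt topology := by
  have hA := pvAM topology.toList 0 none 0
    (PySem.Dict.ofList [("tm_regions", []), ("ecl_regions", []), ("icl_regions", [])])
  simp only [Nat.zero_add, pvPack] at hA
  have hB := pvBMnone topology.toList 0 0 ([], [], [])
  simp only [Nat.add_zero, List.replicate_zero, List.nil_append] at hB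
  have hd0 : (PySem.Dict.ofList
        [("tm_regions", ([] : List (Int × Int))), ("ecl_regions", []), ("icl_regions", [])])
      = PySem.Dict.mk [("tm_regions", []), ("ecl_regions", []), ("icl_regions", [])] := by decide
  have hT := pvDT (pvM topology.toList 0 none)
      (pvMinv topology.toList 0 none (by intro t s h; cases h)) [] [] []
  show (match pvLoopA topology.toList 0
        (PySem.Dict.ofList [("tm_regions", []), ("ecl_regions", []), ("icl_regions", [])], none, 0) with
     | (regions, current_type, start) =>
       match current_type with
       | none => regions.items
       | some ct => (regions.modify (ct ++ "_regions") []
           (fun l => l ++ [((start : Int) + 1, (topology.toList.length : Int))])).items)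
    = match pvGroups (pvFill none topology.toList) 0 ([], [], []) with
      | (tm, ecl, icl) => [("tm_regions", tm), ("ecl_regions", ecl), ("icl_regions", icl)]
  rw [pvItemsPull]
  have hA' : (match pvLoopA topology.toList 0
        (PySem.Dict.ofList [("tm_regions", []), ("ecl_regions", []), ("icl_regions", [])], none, 0) with
     | (regions, current_type, start) =>
       match current_type with
       | none => regions
       | some ct => regions.modify (ct ++ "_regions") []
           (fun l => l ++ [((start : Int) + 1, (topology.toList.length : Int))]))
      = pvApplyD (PySem.Dict.ofList [("tm_regions", []), ("ecl_regions", []), ("icl_regions", [])])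
          (pvM topology.toList 0 none) := hA
  rw [hA', hd0, hB, hT]

-- ===== VERDICT (by name: the statement is the Claim_ definition above) =====
theorem parse_topology_string_spec : Claim_equal_parse_topology_string := by
  intro topology _
  unfold Spec_parse_topology_string
  exact pv_main topology
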